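-- pv_equiv track=rewrite | github.com/D-I-S-C-U-S/art-2-fashion | Package Code/functions_main.py | img_dir_to_id
-- ===== SOURCE A (Python) =====
-- def img_dir_to_id(imgdir):
--   # Get a dictionary of numbers
--   numdict = {}
--   for i in range(10):
--     numdict[str(i)] = True
--   # Get the first number present in reverse order
--   lastnum = len(imgdir)
--   for char in imgdir[::-1]:
--     lastnum -= 1
--     if(char=="."):
--       break
--   # Add numbers in reverse order and break when a non-number shows up
--   imid = ""
--   for char in imgdir[:lastnum][::-1]:
--     if(char not in numdict):
--       break
--     imid = char + imid
--   return int(imid)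
-- ===== SOURCE B (Python) =====
-- def img_dir_to_id(imgdir):
--   # Everything before the last dot (empty if there is no dot), then the
--   # trailing run of ASCII digits of that prefix; int('') raises like A does.
--   before = imgdir.rpartition('.')[0]
--   return int(before[len(before.rstrip('0123456789')):])
-- ===== Notes on version B (the rewrite author's own statement) =====
-- stated objective: idiomatic
-- what changed: Replaces A's hand-rolled digit dictionary and the two explicit reverse-scan loops (dot finder with a break, digit collector building a string by prepending) with two library calls: rpartition('.') to take the part before the last dot and rstrip('0123456789') to isolate its trailing digit run.
-- outside the precondition, e.g. on img_dir_to_id(''): A raises ValueError, B raises ValueError; on img_dir_to_id('.'): A raises ValueError, B raises ValueError; on img_dir_to_id('0123456789'): A raises ValueError, B raises ValueError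
import Mathlib
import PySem

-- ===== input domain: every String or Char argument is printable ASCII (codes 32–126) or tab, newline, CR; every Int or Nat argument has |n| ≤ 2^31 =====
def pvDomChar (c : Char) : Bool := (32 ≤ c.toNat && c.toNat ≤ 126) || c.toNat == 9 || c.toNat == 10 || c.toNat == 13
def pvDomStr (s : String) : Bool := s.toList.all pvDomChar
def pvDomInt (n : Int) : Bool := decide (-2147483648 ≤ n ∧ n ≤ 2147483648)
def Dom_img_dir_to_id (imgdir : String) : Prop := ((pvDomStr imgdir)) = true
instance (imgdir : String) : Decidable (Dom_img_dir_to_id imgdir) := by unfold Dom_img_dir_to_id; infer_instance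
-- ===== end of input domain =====

-- B replaces A's digit dictionary and two hand-rolled reverse-scan loops with
-- rpartition('.') + rstrip('0123456789'); same return value everywhere A returns.


-- ===== PORT A =====
-- numdict built by 'for i in range(10): numdict[str(i)] = True'
def pvNumdict : PySem.Dict String Bool :=
  (PySem.List.pyRange 0 10 1).foldl (fun d i => d.insert (PySem.Int.toStr i) true) PySem.Dict.empty

-- 'lastnum = len(imgdir); for char in imgdir[::-1]: lastnum -= 1; if char == ".": break'
def pvLastnumLoop : List Char → Int → Int
  | [], lastnum => lastnum
  | c :: rest, lastnum =>
      if c = '.' then lastnum - 1 else pvLastnumLoop rest (lastnum - 1)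

-- 'imid = ""; for char in imgdir[:lastnum][::-1]: if char not in numdict: break; imid = char + imid'
def pvImidLoop (numdict : PySem.Dict String Bool) : List Char → List Char → List Char
  | [], imid => imid
  | c :: rest, imid =>
      if numdict.contains (String.ofList [c]) then pvImidLoop numdict rest (c :: imid) else imid

def img_dir_to_id (imgdir : String) : Int :=
  let numdict := pvNumdict
  let lastnum := pvLastnumLoop ((PySem.List.slice? imgdir.toList none none (-1)).getD []) (PySem.Chars.len imgdir.toList)
  let imid := pvImidLoop numdict ((PySem.List.slice? (PySem.List.slice imgdir.toList none (some lastnum)) none none (-1)).getD []) []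
  (PySem.Int.ofChars? imid).getD 0  -- int(imid); none = ValueError, excluded by Pre_

-- ===== PORT B =====
-- s.rpartition('.')[0]: everything before the last '.', '' when there is no dot
def pvRpartBefore (l : List Char) : List Char :=
  match l.reverse.dropWhile (· ≠ '.') with
  | [] => []
  | _ :: rest => rest.reverse

-- s.rstrip('0123456789'): drop the trailing run of these chars (exact: fixed ASCII char set)
def pvRstripDigits (l : List Char) : List Char :=
  (l.reverse.dropWhile (fun c => ['0','1','2','3','4','5','6','7','8','9'].contains c)).reverse

def img_dir_to_id_alt (imgdir : String) : Int :=
  let before := pvRpartBefore imgdir.toList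
  (PySem.Int.ofChars? (before.drop (pvRstripDigits before).length)).getD 0  -- int(''): ValueError, excluded by Pre_

-- ===== PRECONDITION & SPEC =====
-- Pre_: the character just before the last dot exists and is an ASCII digit; on every
-- other input (no dot, nothing before it, or a non-digit there) A's int('') raises ValueError.
def Pre_img_dir_to_id (imgdir : String) : Prop :=
  (match imgdir.toList.reverse.dropWhile (· ≠ '.') with
   | _ :: c :: _ => c.isDigit
   | _ => false) = true
instance (imgdir : String) : Decidable (Pre_img_dir_to_id imgdir) := by unfold Pre_img_dir_to_id; infer_instance
def pvWitness_img_dir_to_id : String := "img123.png"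
def Spec_img_dir_to_id (imgdir : String) (out : Int) : Prop := out = img_dir_to_id_alt imgdir
instance (imgdir : String) (out : Int) : Decidable (Spec_img_dir_to_id imgdir out) := by unfold Spec_img_dir_to_id; infer_instance

-- ===== CLAIM (what is proved, stated in full; the proofs are below) =====
def Claim_equal_img_dir_to_id : Prop := ∀ (imgdir : String), Dom_img_dir_to_id imgdir → Pre_img_dir_to_id imgdir → Spec_img_dir_to_id imgdir (img_dir_to_id imgdir)

-- ===== LEMMAS AND PROOFS =====

-- single-character strings compare like their characters
lemma pvLitBeq (d c : Char) : ((String.ofList [d]) == String.ofList [c]) = decide (c = d) := by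
  by_cases h : c = d
  · subst h; simp
  · simp only [h, decide_false]
    rw [beq_eq_false_iff_ne]
    simp only [ne_eq, String.ext_iff, String.toList_ofList, List.cons.injEq, and_true]
    exact fun hdc => h hdc.symm

-- being one of the ten digit characters is Char.isDigit
lemma pvTenway (c : Char) :
    (c = '0' ∨ c = '1' ∨ c = '2' ∨ c = '3' ∨ c = '4' ∨ c = '5' ∨ c = '6' ∨ c = '7' ∨ c = '8' ∨ c = '9')
      ↔ c.isDigit = true := by
  simp only [Char.isDigit, Bool.and_eq_true, decide_eq_true_eq, Char.ext_iff,
    UInt32.le_iff_toNat_le, UInt32.ext_iff,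
    show ('0').val.toNat = 48 from rfl, show ('1').val.toNat = 49 from rfl,
    show ('2').val.toNat = 50 from rfl, show ('3').val.toNat = 51 from rfl,
    show ('4').val.toNat = 52 from rfl, show ('5').val.toNat = 53 from rfl,
    show ('6').val.toNat = 54 from rfl, show ('7').val.toNat = 55 from rfl,
    show ('8').val.toNat = 56 from rfl, show ('9').val.toNat = 57 from rfl]
  omega

-- A's ten-key dictionary holds the 1-char string of c iff c is an ASCII digit
lemma pvNumdict_contains (c : Char) : pvNumdict.contains (String.ofList [c]) = c.isDigit := by
  have h : pvNumdict = PySem.Dict.mk [("0",true),("1",true),("2",true),("3",true),("4",true),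
    ("5",true),("6",true),("7",true),("8",true),("9",true)] := by decide
  rw [h, show ("0":String) = String.ofList ['0'] from rfl, show ("1":String) = String.ofList ['1'] from rfl,
    show ("2":String) = String.ofList ['2'] from rfl, show ("3":String) = String.ofList ['3'] from rfl,
    show ("4":String) = String.ofList ['4'] from rfl, show ("5":String) = String.ofList ['5'] from rfl,
    show ("6":String) = String.ofList ['6'] from rfl, show ("7":String) = String.ofList ['7'] from rfl,
    show ("8":String) = String.ofList ['8'] from rfl, show ("9":String) = String.ofList ['9'] from rfl]
  simp only [PySem.Dict.contains_mk, List.any_cons, List.any_nil, Bool.or_false, pvLitBeq,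
    ← Bool.decide_or]
  rw [show c.isDigit = decide (c.isDigit = true) by simp]
  exact decide_eq_decide.mpr (pvTenway c)

-- B's digit set agrees with Char.isDigit
lemma pvDigitList_contains (c : Char) :
    (['0','1','2','3','4','5','6','7','8','9'].contains c) = c.isDigit := by
  simp only [List.contains_cons, List.contains_nil, Bool.or_false, Bool.beq_eq_decide_eq,
    ← Bool.decide_or]
  rw [show c.isDigit = decide (c.isDigit = true) by simp]
  exact decide_eq_decide.mpr (pvTenway c)

-- A's first loop: the value of lastnum after the reverse scan with break
lemma pvLastnumLoop_eq (chars : List Char) (n : Int) :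
    pvLastnumLoop chars n =
      if '.' ∈ chars then n - ((chars.takeWhile (· ≠ '.')).length + 1) else n - chars.length := by
  induction chars generalizing n with
  | nil => simp [pvLastnumLoop]
  | cons c rest ih =>
    simp only [pvLastnumLoop]
    by_cases hc : c = '.'
    · subst hc; simp
    · rw [if_neg hc, ih]
      have hpc : decide (c ≠ '.') = true := by simp [hc]
      by_cases hm : ('.':Char) ∈ rest
      · rw [if_pos hm, if_pos (show ('.':Char) ∈ c::rest from List.mem_cons_of_mem _ hm)]
        simp only [List.takeWhile_cons, hpc, if_true, List.length_cons]
        push_cast; ring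
      · have hm' : ('.':Char) ∉ c :: rest := by
          simp only [List.mem_cons, not_or]; exact ⟨fun h => hc h.symm, hm⟩
        rw [if_neg hm, if_neg hm']
        simp only [List.length_cons]; push_cast; ring

-- A's slice imgdir[:lastnum] is exactly B's rpartition prefix
lemma pvSlice_eq_rpartBefore (l : List Char) :
    PySem.List.slice l none (some (pvLastnumLoop l.reverse (l.length : Int))) = pvRpartBefore l := by
  rw [pvLastnumLoop_eq]
  unfold pvRpartBefore
  cases h : l.reverse.dropWhile (· ≠ '.') with
  | nil =>
    have hmem : ('.' : Char) ∉ l.reverse := by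
      intro hm
      have := List.dropWhile_eq_nil_iff.mp h '.' hm
      simp at this
    rw [if_neg hmem]
    have h0 : ((l.length : Int) - l.reverse.length) = 0 := by simp
    rw [h0, PySem.List.slice_to l (le_refl 0)]
    simp
  | cons d rest =>
    have hdec := List.takeWhile_append_dropWhile (p := (· ≠ '.')) (l := l.reverse)
    rw [h] at hdec
    have hd : d = '.' := by
      have := List.head_dropWhile_not (p := (· ≠ '.')) (l := l.reverse) (by rw [h]; simp)
      simp only [h, List.head_cons, decide_eq_false_iff_not, not_not] at this
      exact this
    have hmem : ('.' : Char) ∈ l.reverse := by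
      have hm : ('.':Char) ∈ l.reverse.dropWhile (· ≠ '.') := by
        rw [h, hd]; exact List.mem_cons_self
      exact (List.dropWhile_sublist _).subset hm
    rw [if_pos hmem]
    have hlen : l.length = (List.takeWhile (fun x => decide (x ≠ '.')) l.reverse).length + rest.length + 1 := by
      have h2 := congrArg List.length hdec
      simp only [List.length_append, List.length_cons, List.length_reverse] at h2
      omega
    rw [PySem.List.slice_to l (by omega)]
    have htoNat : ((l.length : Int) - (↑(List.takeWhile (fun x => decide (x ≠ '.')) l.reverse).length + 1)).toNat = rest.length := by
      omega
    rw [htoNat]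
    have hl : l = rest.reverse ++ ([d] ++ (List.takeWhile (fun x => decide (x ≠ '.')) l.reverse).reverse) := by
      have h2 := congrArg List.reverse hdec
      simp only [List.reverse_append, List.reverse_cons, List.reverse_reverse] at h2
      conv_lhs => rw [← h2]
      rw [List.append_assoc]
    rw [hl, List.take_left' (by simp)]

-- A's second loop collects the reversed leading digit run
lemma pvImidLoop_eq (chars imid : List Char) :
    pvImidLoop pvNumdict chars imid = (chars.takeWhile (fun c => c.isDigit)).reverse ++ imid := by
  induction chars generalizing imid with
  | nil => simp [pvImidLoop]
  | cons c rest ih =>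
    simp only [pvImidLoop, pvNumdict_contains, List.takeWhile_cons]
    cases hd : c.isDigit with
    | true => simp only [if_true, ih, List.reverse_cons, List.append_assoc, List.cons_append,
        List.nil_append]
    | false => simp

-- B's rstrip-based drop is the reversed trailing digit run
lemma pvDrop_rstrip (l : List Char) :
    l.drop (pvRstripDigits l).length = (l.reverse.takeWhile (fun c => c.isDigit)).reverse := by
  unfold pvRstripDigits
  have hp : (fun c => ['0','1','2','3','4','5','6','7','8','9'].contains c) = (fun c : Char => c.isDigit) := by
    funext c; exact pvDigitList_contains c
  rw [hp]
  have hdec := List.takeWhile_append_dropWhile (p := fun c : Char => c.isDigit) (l := l.reverse)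
  have hl : l = (l.reverse.dropWhile (fun c : Char => c.isDigit)).reverse
      ++ (l.reverse.takeWhile (fun c : Char => c.isDigit)).reverse := by
    have h2 := congrArg List.reverse hdec
    simp only [List.reverse_append, List.reverse_reverse] at h2
    exact h2.symm
  conv_lhs => rw [hl]
  rw [List.length_reverse, List.drop_left' (by simp)]

-- ===== VERDICT (by name: the statement is the Claim_ definition above) =====
theorem img_dir_to_id_spec : Claim_equal_img_dir_to_id := by
  intro imgdir _ _
  unfold Spec_img_dir_to_id img_dir_to_id img_dir_to_id_alt
  simp only [PySem.List.slice?_none_none_neg_one, Option.getD_some, PySem.Chars.len_eq,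
    pvImidLoop_eq, pvSlice_eq_rpartBefore, pvDrop_rstrip, List.append_nil]
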